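-- pv_equiv track=rewrite | github.com/lantonov/Optimisation | bayesopt_cli.py | translate_result
-- ===== SOURCE A (Python) =====
-- def translate_result(result):
--   pentares = []
--   for i in range(0,len(result) - 1,2):
--     current, next = result[i], result[i + 1]
--     pentares.append(str(current)+str(next))
--   category = [0,0,0,0,0]
--   for score in pentares:
--     if score == 'll':
--       category[0] = category[0]+1
--     if score == 'ld' or score == 'dl':
--       category[1] = category[1]+1
--     if score == 'dd' or score == 'wl' or score == 'lw':
--       category[2] = category[2]+1
--     if score == 'wd' or score == 'dw':
--       category[3] = category[3]+1
--     if score == 'ww':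
--       category[4] = category[4]+1
--   return category
-- ===== SOURCE B (Python) =====
-- def translate_result(result):
--     # Pair consecutive elements with a doubled iterator and classify each pair
--     # arithmetically: l=0, d=1, w=2; the category index is the sum of the two values.
--     val = {'l': 0, 'd': 1, 'w': 2}
--     category = [0, 0, 0, 0, 0]
--     it = iter(result)
--     for x, y in zip(it, it):
--         s = str(x) + str(y)
--         if len(s) == 2 and s[0] in val and s[1] in val:
--             category[val[s[0]] + val[s[1]]] += 1
--     return category
-- ===== Notes on version B (the rewrite author's own statement) =====
-- stated objective: alternative
-- what changed: B pairs consecutive elements with a doubled iterator (zip(it,it)) instead of an index-range loop, builds no intermediate pair list, and replaces A's five-branch equality cascade by an arithmetic bucket index: map l/d/w to 0/1/2 and increment category[val[s[0]]+val[s[1]]] in one pass.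
import Mathlib
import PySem

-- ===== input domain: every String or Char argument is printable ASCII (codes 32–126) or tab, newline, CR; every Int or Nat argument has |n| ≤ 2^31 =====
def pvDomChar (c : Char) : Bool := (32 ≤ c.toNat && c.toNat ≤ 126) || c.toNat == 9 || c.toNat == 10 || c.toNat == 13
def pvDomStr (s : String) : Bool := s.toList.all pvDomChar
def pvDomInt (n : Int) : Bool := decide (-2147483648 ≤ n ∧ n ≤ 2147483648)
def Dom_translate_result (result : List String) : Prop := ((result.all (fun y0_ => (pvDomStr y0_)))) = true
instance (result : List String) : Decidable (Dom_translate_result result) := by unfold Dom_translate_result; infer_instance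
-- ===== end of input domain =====

-- B pairs consecutive elements with a doubled iterator instead of an index range and
-- replaces A's five-branch equality cascade by an arithmetic bucket index (alternative; same cost).

-- ===== PORT A =====
-- result[i] and result[i+1] are always in range for i from range(0, len-1, 2), so pyGetD "" is exact here.
def pvStepA (c : Int × Int × Int × Int × Int) (score : String) : Int × Int × Int × Int × Int :=
  let c := if score == "ll" then (c.1 + 1, c.2.1, c.2.2.1, c.2.2.2.1, c.2.2.2.2) else c
  let c := if score == "ld" || score == "dl" then (c.1, c.2.1 + 1, c.2.2.1, c.2.2.2.1, c.2.2.2.2) else c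
  let c := if score == "dd" || score == "wl" || score == "lw" then (c.1, c.2.1, c.2.2.1 + 1, c.2.2.2.1, c.2.2.2.2) else c
  let c := if score == "wd" || score == "dw" then (c.1, c.2.1, c.2.2.1, c.2.2.2.1 + 1, c.2.2.2.2) else c
  let c := if score == "ww" then (c.1, c.2.1, c.2.2.1, c.2.2.2.1, c.2.2.2.2 + 1) else c
  c

def translate_result (result : List String) : List Int :=
  let pentares : List String :=
    (PySem.List.pyRange 0 ((result.length : Int) - 1) 2).foldl
      (fun acc i =>
        acc ++ [PySem.List.pyGetD result i "" ++ PySem.List.pyGetD result (i + 1) ""]) []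
  let c := pentares.foldl pvStepA (0, 0, 0, 0, 0)
  [c.1, c.2.1, c.2.2.1, c.2.2.2.1, c.2.2.2.2]

-- ===== PORT B =====
-- zip(it, it) on a doubled iterator yields the consecutive disjoint pairs, dropping a trailing odd element:
def pvPairs : List String → List (String × String)
  | x :: y :: t => (x, y) :: pvPairs t
  | _ => []

-- the dict val = {'l': 0, 'd': 1, 'w': 2}: lookup of a one-character string (Python's s[0]) by its character
def pvV? (c : Char) : Option Int :=
  if c = 'l' then some 0 else if c = 'd' then some 1 else if c = 'w' then some 2 else none

-- "len(s) == 2 and s[0] in val and s[1] in val", then "val[s[0]] + val[s[1]]":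
-- matching s.toList against [c1, c2] is exactly the length-2 test plus the two indexings.
def pvCat? (s : String) : Option Int :=
  match s.toList with
  | [c1, c2] =>
    match pvV? c1, pvV? c2 with
    | some a, some b => some (a + b)
    | _, _ => none
  | _ => none

def translate_result_alt (result : List String) : List Int :=
  (pvPairs result).foldl
    (fun cat xy =>
      match pvCat? (xy.1 ++ xy.2) with
      | some k => cat.set k.toNat (cat.getD k.toNat 0 + 1)   -- category[k] += 1 (0 ≤ k ≤ 4 < 5 always)
      | none => cat)
    [0, 0, 0, 0, 0]

-- ===== PRECONDITION & SPEC =====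
def Spec_translate_result (result : List String) (out : List Int) : Prop := out = translate_result_alt result
instance (result : List String) (out : List Int) : Decidable (Spec_translate_result result out) := by unfold Spec_translate_result; infer_instance

-- ===== CLAIM (what is proved, stated in full; the proofs are below) =====
def Claim_equal_translate_result : Prop := ∀ (result : List String), Dom_translate_result result → Spec_translate_result result (translate_result result)

-- ===== LEMMAS AND PROOFS =====

-- A's tally loop computes the five counts of its pair-string list.
theorem foldl_pvStepA (ps : List String) (c : Int × Int × Int × Int × Int) :
    ps.foldl pvStepA c =
      (c.1 + ps.count "ll",
       c.2.1 + ps.count "ld" + ps.count "dl",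
       c.2.2.1 + ps.count "dd" + ps.count "wl" + ps.count "lw",
       c.2.2.2.1 + ps.count "wd" + ps.count "dw",
       c.2.2.2.2 + ps.count "ww") := by
  induction ps generalizing c with
  | nil => simp
  | cons p ps ih =>
    simp only [List.foldl_cons, ih, List.count_cons]
    by_cases h0 : p = "ll"
    · subst h0; simp [pvStepA]; omega
    by_cases h1 : p = "ld"
    · subst h1; simp [pvStepA]; omega
    by_cases h2 : p = "dl"
    · subst h2; simp [pvStepA]; omega
    by_cases h3 : p = "dd"
    · subst h3; simp [pvStepA]; omega
    by_cases h4 : p = "wl"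
    · subst h4; simp [pvStepA]; omega
    by_cases h5 : p = "lw"
    · subst h5; simp [pvStepA]; omega
    by_cases h6 : p = "wd"
    · subst h6; simp [pvStepA]; omega
    by_cases h7 : p = "dw"
    · subst h7; simp [pvStepA]; omega
    by_cases h8 : p = "ww"
    · subst h8; simp [pvStepA]; omega
    simp [pvStepA, h0, h1, h2, h3, h4, h5, h6, h7, h8]

-- The index-range pair list, in Nat-index form, equals the structural pairing.
theorem range_pairs : ∀ (xs : List String),
    (List.range (xs.length / 2)).map (fun k => xs.getD (2*k) "" ++ xs.getD (2*k+1) "") =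
    (pvPairs xs).map (fun xy => xy.1 ++ xy.2)
  | [] => by simp [pvPairs]
  | [x] => by simp [pvPairs]
  | x :: y :: t => by
    have ih := range_pairs t
    have hlen : (x :: y :: t).length / 2 = t.length / 2 + 1 := by
      simp [List.length_cons]; omega
    rw [hlen, List.range_succ_eq_map, List.map_cons, List.map_map]
    simp only [pvPairs, List.map_cons]
    refine List.cons_eq_cons.mpr ⟨by simp, ?_⟩
    rw [← ih]
    apply List.map_congr_left
    intro k _
    simp only [Function.comp, Nat.succ_eq_add_one]
    rw [show 2 * (k + 1) = (2 * k) + 1 + 1 from by ring,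
        show 2 * k + 1 + 1 + 1 = (2 * k + 1) + 1 + 1 from by ring]
    simp

-- A's index-range pair construction equals the structural pairing.
theorem pairsA_eq (xs : List String) :
    (PySem.List.pyRange 0 ((xs.length : Int) - 1) 2).map
      (fun i => PySem.List.pyGetD xs i "" ++ PySem.List.pyGetD xs (i + 1) "") =
    (pvPairs xs).map (fun xy => xy.1 ++ xy.2) := by
  rw [PySem.List.pyRange_of_pos 0 ((xs.length : Int) - 1) (by norm_num), List.map_map]
  rw [← range_pairs xs]
  have hM : (if (0:Int) < (xs.length : Int) - 1 then ((((xs.length : Int) - 1) - 0 + 2 - 1) / 2).toNat else 0) = xs.length / 2 := by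
    split_ifs <;> omega
  rw [hM]
  apply List.map_congr_left
  intro k _
  have h1 : (0 : Int) + 2 * (k : Int) = ((2 * k : Nat) : Int) := by push_cast; ring
  have h2 : ((2 * k : Nat) : Int) + 1 = ((2 * k + 1 : Nat) : Int) := by push_cast; ring
  simp only [Function.comp, h1, h2, PySem.List.pyGetD_natCast]

-- pvCat? classifies exactly A's nine codes.
theorem pvCat?_eq_some_iff (s : String) (k : Int) :
    pvCat? s = some k ↔
      (k = 0 ∧ s = "ll") ∨
      (k = 1 ∧ (s = "ld" ∨ s = "dl")) ∨
      (k = 2 ∧ (s = "dd" ∨ s = "wl" ∨ s = "lw")) ∨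
      (k = 3 ∧ (s = "wd" ∨ s = "dw")) ∨
      (k = 4 ∧ s = "ww") := by
  unfold pvCat?
  rcases h : s.toList with _ | ⟨c1, _ | ⟨c2, _ | ⟨c3, tl⟩⟩⟩ <;>
    simp only [← String.toList_inj, h] <;>
    try (simp; done)
  unfold pvV?
  by_cases h1 : c1 = 'l' <;> by_cases h1d : c1 = 'd' <;> by_cases h1w : c1 = 'w' <;>
  by_cases h2 : c2 = 'l' <;> by_cases h2d : c2 = 'd' <;> by_cases h2w : c2 = 'w' <;>
    subst_vars <;> simp_all <;> omega

-- The nine codes, grouped by category, are exactly pvCat?'s fibres.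
theorem counts_eq (ps : List String) :
    ps.countP (fun s => pvCat? s == some 0) = ps.count "ll" ∧
    ps.countP (fun s => pvCat? s == some 1) = ps.count "ld" + ps.count "dl" ∧
    ps.countP (fun s => pvCat? s == some 2) = ps.count "dd" + ps.count "wl" + ps.count "lw" ∧
    ps.countP (fun s => pvCat? s == some 3) = ps.count "wd" + ps.count "dw" ∧
    ps.countP (fun s => pvCat? s == some 4) = ps.count "ww" := by
  induction ps with
  | nil => simp
  | cons p ps ih =>
    obtain ⟨i0, i1, i2, i3, i4⟩ := ih
    simp only [List.countP_cons, List.count_cons]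
    by_cases h0 : p = "ll"
    · subst h0
      simp [show pvCat? "ll" = some 0 from by decide, i0, i1, i2, i3, i4]
    by_cases h1 : p = "ld"
    · subst h1
      simp [show pvCat? "ld" = some 1 from by decide, i0, i1, i2, i3, i4]; omega
    by_cases h2 : p = "dl"
    · subst h2
      simp [show pvCat? "dl" = some 1 from by decide, i0, i1, i2, i3, i4]; omega
    by_cases h3 : p = "dd"
    · subst h3
      simp [show pvCat? "dd" = some 2 from by decide, i0, i1, i2, i3, i4]; omega
    by_cases h4 : p = "wl"
    · subst h4
      simp [show pvCat? "wl" = some 2 from by decide, i0, i1, i2, i3, i4]; omega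
    by_cases h5 : p = "lw"
    · subst h5
      simp [show pvCat? "lw" = some 2 from by decide, i0, i1, i2, i3, i4]; omega
    by_cases h6 : p = "wd"
    · subst h6
      simp [show pvCat? "wd" = some 3 from by decide, i0, i1, i2, i3, i4]; omega
    by_cases h7 : p = "dw"
    · subst h7
      simp [show pvCat? "dw" = some 3 from by decide, i0, i1, i2, i3, i4]; omega
    by_cases h8 : p = "ww"
    · subst h8
      simp [show pvCat? "ww" = some 4 from by decide, i0, i1, i2, i3, i4]
    have hnone : ∀ k : Int, pvCat? p ≠ some k ∨ (k ≠ 0 ∧ k ≠ 1 ∧ k ≠ 2 ∧ k ≠ 3 ∧ k ≠ 4) := by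
      intro k
      by_cases hk : pvCat? p = some k
      · rcases (pvCat?_eq_some_iff p k).mp hk with ⟨_, h⟩ | ⟨_, h | h⟩ | ⟨_, h | h | h⟩ | ⟨_, h | h⟩ | ⟨_, h⟩ <;> simp_all
      · exact Or.inl hk
    have e : ∀ k : Int, k = 0 ∨ k = 1 ∨ k = 2 ∨ k = 3 ∨ k = 4 → (pvCat? p == some k) = false := by
      intro k hk
      rcases hnone k with h | h
      · simp [h]
      · omega
    simp [e 0 (by omega), e 1 (by omega), e 2 (by omega), e 3 (by omega), e 4 (by omega),
      h0, h1, h2, h3, h4, h5, h6, h7, h8, i0, i1, i2, i3, i4]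

-- B's bucket loop computes the five countP's of its pair list.
theorem foldl_alt_counts (ps : List (String × String)) (a0 a1 a2 a3 a4 : Int) :
    ps.foldl
      (fun cat xy =>
        match pvCat? (xy.1 ++ xy.2) with
        | some k => cat.set k.toNat (cat.getD k.toNat 0 + 1)
        | none => cat)
      [a0, a1, a2, a3, a4] =
      [a0 + ps.countP (fun xy => pvCat? (xy.1 ++ xy.2) == some 0),
       a1 + ps.countP (fun xy => pvCat? (xy.1 ++ xy.2) == some 1),
       a2 + ps.countP (fun xy => pvCat? (xy.1 ++ xy.2) == some 2),
       a3 + ps.countP (fun xy => pvCat? (xy.1 ++ xy.2) == some 3),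
       a4 + ps.countP (fun xy => pvCat? (xy.1 ++ xy.2) == some 4)] := by
  induction ps generalizing a0 a1 a2 a3 a4 with
  | nil => simp
  | cons p ps ih =>
    rw [List.foldl_cons]
    rcases hc : pvCat? (p.1 ++ p.2) with _ | k
    · simp only [hc]
      rw [ih]
      simp [hc]
    · rcases (pvCat?_eq_some_iff _ k).mp hc with ⟨hk, _⟩ | ⟨hk, _⟩ | ⟨hk, _⟩ | ⟨hk, _⟩ | ⟨hk, _⟩
      · subst hk; simp only [hc]
        rw [show ([a0, a1, a2, a3, a4] : List Int).set (((0:Int)).toNat) (([a0, a1, a2, a3, a4] : List Int).getD (((0:Int)).toNat) 0 + 1) = [a0 + 1, a1, a2, a3, a4] from by simp [List.getD], ih]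
        simp [hc]
        omega
      · subst hk; simp only [hc]
        rw [show ([a0, a1, a2, a3, a4] : List Int).set (((1:Int)).toNat) (([a0, a1, a2, a3, a4] : List Int).getD (((1:Int)).toNat) 0 + 1) = [a0, a1 + 1, a2, a3, a4] from by simp [List.getD], ih]
        simp [hc]
        omega
      · subst hk; simp only [hc]
        rw [show ([a0, a1, a2, a3, a4] : List Int).set (((2:Int)).toNat) (([a0, a1, a2, a3, a4] : List Int).getD (((2:Int)).toNat) 0 + 1) = [a0, a1, a2 + 1, a3, a4] from by simp [List.getD], ih]
        simp [hc]
        omega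
      · subst hk; simp only [hc]
        rw [show ([a0, a1, a2, a3, a4] : List Int).set (((3:Int)).toNat) (([a0, a1, a2, a3, a4] : List Int).getD (((3:Int)).toNat) 0 + 1) = [a0, a1, a2, a3 + 1, a4] from by simp [List.getD], ih]
        simp [hc]
        omega
      · subst hk; simp only [hc]
        rw [show ([a0, a1, a2, a3, a4] : List Int).set (((4:Int)).toNat) (([a0, a1, a2, a3, a4] : List Int).getD (((4:Int)).toNat) 0 + 1) = [a0, a1, a2, a3, a4 + 1] from by simp [List.getD], ih]
        simp [hc]
        omega

-- ===== VERDICT (by name: the statement is the Claim_ definition above) =====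
theorem translate_result_spec : Claim_equal_translate_result := by
  intro result _
  unfold Spec_translate_result translate_result translate_result_alt
  simp only [List.nil_append, PySem.List.foldl_append_singleton_eq_map, pairsA_eq,
    foldl_pvStepA, foldl_alt_counts]
  obtain ⟨h0, h1, h2, h3, h4⟩ := counts_eq ((pvPairs result).map (fun xy => xy.1 ++ xy.2))
  simp only [List.countP_map, Function.comp_def] at h0 h1 h2 h3 h4
  zify at h0 h1 h2 h3 h4
  simp only [zero_add, ← h0, ← h1, ← h2, ← h3, ← h4]
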